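-- pv_equiv track=rewrite | github.com/Pulee0019/Data-Analysis | Running_analysis.py | find_contiguous_regions
-- ===== SOURCE A (Python) =====
-- def find_contiguous_regions(mask, min_samples):
--     """Find contiguous regions in a boolean mask with minimum length"""
--     regions = []
--     in_region = False
--     region_start = 0
--
--     for i in range(len(mask)):
--         if mask[i] and not in_region:
--             in_region = True
--             region_start = i
--         elif not mask[i] and in_region:
--             in_region = False
--             region_end = i - 1
--             if region_end - region_start + 1 >= min_samples:
--                 regions.append((region_start, region_end))
--
--     if in_region and len(mask) - region_start >= min_samples:
--         regions.append((region_start, len(mask) - 1))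
--
--     return regions
-- ===== SOURCE B (Python) =====
-- def find_contiguous_regions(mask, min_samples):
--     """Find contiguous regions in a boolean mask with minimum length.
--
--     Run-jump scan: advance over each maximal run of equal truth values at once,
--     emit the run if it is True and long enough -- no in_region flag."""
--     regions = []
--     n = len(mask)
--     i = 0
--     while i < n:
--         j = i
--         while j < n and bool(mask[j]) == bool(mask[i]):
--             j += 1
--         if mask[i] and j - i >= min_samples:
--             regions.append((i, j - 1))
--         i = j
--     return regions
-- ===== Notes on version B (the rewrite author's own statement) =====
-- stated objective: alternative
-- what changed: Replaces A's single index loop with an in_region flag and deferred end-of-mask check by a run-jump scan: repeatedly measure the length of the next maximal run of equal values, emit (start, end) for True runs meeting min_samples, and jump past the run; no flag, no post-loop fixup.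
import Mathlib
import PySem

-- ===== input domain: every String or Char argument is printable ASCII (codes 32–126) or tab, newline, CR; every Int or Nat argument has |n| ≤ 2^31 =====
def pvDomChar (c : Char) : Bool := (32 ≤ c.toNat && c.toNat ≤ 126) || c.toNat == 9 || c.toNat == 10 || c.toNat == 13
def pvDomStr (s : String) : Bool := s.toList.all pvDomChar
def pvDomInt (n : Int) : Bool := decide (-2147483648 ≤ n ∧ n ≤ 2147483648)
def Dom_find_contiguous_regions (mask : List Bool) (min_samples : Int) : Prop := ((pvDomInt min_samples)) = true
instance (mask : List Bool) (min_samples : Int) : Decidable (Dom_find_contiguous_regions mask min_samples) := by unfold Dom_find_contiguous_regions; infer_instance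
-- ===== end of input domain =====

-- B re-implements the flag-based scan of A as a run-jump scan (skip whole runs of equal values,
-- emit qualifying True runs); objective: alternative decomposition, same O(n) cost.

-- ===== PORT A =====
-- loop body of A: state = (regions, in_region, region_start); i = index, m = mask[i]
def stepA (min_samples : Int) (st : List (Int × Int) × Bool × Int) (i : Int) (m : Bool) :
    List (Int × Int) × Bool × Int :=
  if m && !st.2.1 then (st.1, true, i)
  else if !m && st.2.1 then
    let region_end := i - 1
    if region_end - st.2.2 + 1 ≥ min_samples then (st.1 ++ [(st.2.2, region_end)], false, st.2.2)
    else (st.1, false, st.2.2)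
  else st

-- A's post-loop tail check
def finishA (min_samples n : Int) (st : List (Int × Int) × Bool × Int) : List (Int × Int) :=
  if st.2.1 && decide (n - st.2.2 ≥ min_samples) then st.1 ++ [(st.2.2, n - 1)] else st.1

def find_contiguous_regions (mask : List Bool) (min_samples : Int) : List (Int × Int) :=
  finishA min_samples (PySem.List.len mask)
    ((PySem.List.pyRange 0 (PySem.List.len mask) 1).foldl
      (fun st i => stepA min_samples st i (PySem.List.pyGetD mask i false)) ([], false, 0))

-- ===== PORT B =====
-- inner while of B: length of the leading run of elements equal to x
def pvRunLen (x : Bool) : List Bool → Nat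
  | [] => 0
  | y :: ys => if y == x then pvRunLen x ys + 1 else 0

-- outer while of B: i = current position, jump over one maximal run per step
def pvAltGo (min_samples : Int) (i : Nat) : List Bool → List (Int × Int)
  | [] => []
  | x :: xs =>
    let r := pvRunLen x xs
    let j := i + r + 1
    let rest := pvAltGo min_samples j (xs.drop r)
    if x && decide ((j : Int) - (i : Int) ≥ min_samples) then ((i : Int), (j : Int) - 1) :: rest
    else rest
termination_by l => l.length
decreasing_by simp

def find_contiguous_regions_alt (mask : List Bool) (min_samples : Int) : List (Int × Int) :=
  pvAltGo min_samples 0 mask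

-- ===== PRECONDITION & SPEC =====
def Spec_find_contiguous_regions (mask : List Bool) (min_samples : Int) (out : List (Int × Int)) : Prop := out = find_contiguous_regions_alt mask min_samples
instance (mask : List Bool) (min_samples : Int) (out : List (Int × Int)) : Decidable (Spec_find_contiguous_regions mask min_samples out) := by unfold Spec_find_contiguous_regions; infer_instance

-- ===== CLAIM (what is proved, stated in full; the proofs are below) =====
def Claim_equal_find_contiguous_regions : Prop := ∀ (mask : List Bool) (min_samples : Int), Dom_find_contiguous_regions mask min_samples → Spec_find_contiguous_regions mask min_samples (find_contiguous_regions mask min_samples)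

-- ===== LEMMAS AND PROOFS =====

-- B skips a leading False run exactly one element at a time
lemma pvAltGo_false_cons (m : Int) (a : Nat) (xs : List Bool) :
    pvAltGo m a (false :: xs) = pvAltGo m (a + 1) xs := by
  cases xs with
  | nil => simp [pvAltGo, pvRunLen]
  | cons y ys =>
    cases y with
    | true =>
      rw [pvAltGo.eq_def]
      simp [pvRunLen]
    | false =>
      conv_lhs => rw [pvAltGo.eq_def]
      conv_rhs => rw [pvAltGo.eq_def]
      simp [pvRunLen]
      congr 1
      omega

-- the main invariant: A's fold over (enumerate xs) from either state equals
-- 'already-collected regions ++' B's run-jump scan of the remainder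
lemma main_inv (m : Int) (xs : List Bool) :
    (∀ (a : Nat) (regions : List (Int × Int)) (rs : Int),
      finishA m ((a : Int) + xs.length)
        ((PySem.List.enumerate xs (a : Int)).foldl (fun st p => stepA m st p.1 p.2)
          (regions, false, rs))
        = regions ++ pvAltGo m a xs)
    ∧ (∀ (s t : Nat) (regions : List (Int × Int)), 1 ≤ t →
      finishA m (((s + t : Nat) : Int) + xs.length)
        ((PySem.List.enumerate xs ((s + t : Nat) : Int)).foldl (fun st p => stepA m st p.1 p.2)
          (regions, true, (s : Int)))
        = regions ++
            (if ((t + pvRunLen true xs : Nat) : Int) ≥ m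
             then ((s : Int), (s : Int) + ((t + pvRunLen true xs : Nat) : Int) - 1)
                    :: pvAltGo m (s + t + pvRunLen true xs) (xs.drop (pvRunLen true xs))
             else pvAltGo m (s + t + pvRunLen true xs) (xs.drop (pvRunLen true xs)))) := by
  induction xs with
  | nil =>
    refine ⟨fun a regions rs => by simp [finishA, pvAltGo], fun s t regions ht => ?_⟩
    simp only [PySem.List.enumerate_nil, List.foldl_nil, List.length_nil, Nat.cast_zero,
      add_zero, finishA, pvRunLen]
    by_cases hcond : ((t : Nat) : Int) ≥ m
    · rw [if_pos (show (true && decide (((s + t : Nat) : Int) - (s : Int) ≥ m)) = true by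
        simp; omega), if_pos hcond]
      simp [pvAltGo]
    · rw [if_neg (show ¬ (true && decide (((s + t : Nat) : Int) - (s : Int) ≥ m)) = true by
        simp; omega), if_neg hcond]
      simp [pvAltGo]
  | cons x xs ih =>
    obtain ⟨ihOut, ihIn⟩ := ih
    constructor
    · intro a regions rs
      cases x with
      | false =>
        rw [PySem.List.enumerate_cons, List.foldl_cons]
        have hst : stepA m (regions, false, rs) (a : Int) false = (regions, false, rs) := by
          simp [stepA]
        rw [hst]
        have hs : ((a : Int) + 1) = ((a + 1 : Nat) : Int) := by push_cast; ring
        have hn : ((a : Int) + ((false :: xs).length : Int)) = ((a + 1 : Nat) : Int) + (xs.length : Int) := by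
          push_cast; simp; ring
        rw [hs, hn, ihOut (a + 1) regions rs, pvAltGo_false_cons]
      | true =>
        rw [PySem.List.enumerate_cons, List.foldl_cons]
        have hst : stepA m (regions, false, rs) (a : Int) true = (regions, true, (a : Int)) := by
          simp [stepA]
        rw [hst]
        have hs : ((a : Int) + 1) = ((a + 1 : Nat) : Int) := by push_cast; ring
        have hn : ((a : Int) + ((true :: xs).length : Int)) = ((a + 1 : Nat) : Int) + (xs.length : Int) := by
          push_cast; simp; ring
        rw [hs, hn]
        have := ihIn a 1 regions (le_refl 1)
        rw [this]
        congr 1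
        simp only [pvAltGo]
        have e2 : a + 1 + pvRunLen true xs = a + pvRunLen true xs + 1 := by omega
        by_cases h : ((1 + pvRunLen true xs : Nat) : Int) ≥ m
        · rw [if_pos h, if_pos (show (true && decide (((a + pvRunLen true xs + 1 : Nat) : Int) - (a : Int) ≥ m)) = true by
            simp only [Bool.true_and, decide_eq_true_eq]; push_cast at h ⊢; omega)]
          have e1 : (a : Int) + ((1 + pvRunLen true xs : Nat) : Int) - 1 = ((a + pvRunLen true xs + 1 : Nat) : Int) - 1 := by
            push_cast; ring
          rw [e1, e2]
        · rw [if_neg h, if_neg (show ¬ (true && decide (((a + pvRunLen true xs + 1 : Nat) : Int) - (a : Int) ≥ m)) = true by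
            simp only [Bool.true_and, decide_eq_true_eq]; push_cast at h ⊢; omega)]
          rw [e2]
    · intro s t regions ht
      cases x with
      | true =>
        rw [PySem.List.enumerate_cons, List.foldl_cons]
        have hst : stepA m (regions, true, (s : Int)) ((s + t : Nat) : Int) true
            = (regions, true, (s : Int)) := by simp [stepA]
        rw [hst]
        have hs : (((s + t : Nat) : Int) + 1) = ((s + (t + 1) : Nat) : Int) := by push_cast; ring
        have hn : (((s + t : Nat) : Int) + ((true :: xs).length : Int))
            = ((s + (t + 1) : Nat) : Int) + (xs.length : Int) := by push_cast; simp; ring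
        rw [hs, hn, ihIn s (t + 1) regions (by omega)]
        congr 1
        have hr : pvRunLen true (true :: xs) = pvRunLen true xs + 1 := by simp [pvRunLen]
        rw [hr]
        have h1 : t + (pvRunLen true xs + 1) = (t + 1) + pvRunLen true xs := by omega
        have h2 : s + t + (pvRunLen true xs + 1) = s + (t + 1) + pvRunLen true xs := by omega
        rw [h1, h2, List.drop_succ_cons]
      | false =>
        rw [PySem.List.enumerate_cons, List.foldl_cons]
        have hr : pvRunLen true (false :: xs) = 0 := by simp [pvRunLen]
        have hs : (((s + t : Nat) : Int) + 1) = ((s + t + 1 : Nat) : Int) := by push_cast; ring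
        have hn : (((s + t : Nat) : Int) + ((false :: xs).length : Int))
            = ((s + t + 1 : Nat) : Int) + (xs.length : Int) := by push_cast; simp; ring
        by_cases hc : m ≤ (s : Int) + (t : Int) - 1 - (s : Int) + 1
        · have hst : stepA m (regions, true, (s : Int)) ((s + t : Nat) : Int) false
              = (regions ++ [((s : Int), ((s + t : Nat) : Int) - 1)], false, (s : Int)) := by
            simp [stepA, hc]
          rw [hst, hs, hn, ihOut (s + t + 1) _ (s : Int), hr]
          simp only [Nat.add_zero, List.drop_zero, List.append_assoc, List.singleton_append]
          rw [if_pos (show ((t : Nat) : Int) ≥ m by omega)]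
          rw [pvAltGo_false_cons]
          have e1 : ((s + t : Nat) : Int) - 1 = (s : Int) + ((t : Nat) : Int) - 1 := by
            push_cast; ring
          rw [e1]
        · have hst : stepA m (regions, true, (s : Int)) ((s + t : Nat) : Int) false
              = (regions, false, (s : Int)) := by
            simp [stepA, hc]
          rw [hst, hs, hn, ihOut (s + t + 1) regions (s : Int), hr]
          simp only [Nat.add_zero, List.drop_zero]
          rw [if_neg (show ¬ ((t : Nat) : Int) ≥ m by omega)]
          rw [pvAltGo_false_cons]

theorem ports_agree (mask : List Bool) (m : Int) :
    find_contiguous_regions mask m = find_contiguous_regions_alt mask m := by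
  unfold find_contiguous_regions find_contiguous_regions_alt
  rw [show (PySem.List.pyRange 0 (PySem.List.len mask) 1).foldl
        (fun st i => stepA m st i (PySem.List.pyGetD mask i false)) ([], false, 0)
      = (PySem.List.enumerate mask 0).foldl (fun st p => stepA m st p.1 p.2) ([], false, 0) by
    rw [PySem.List.enumerate_eq_map_pyRange (d := false), List.foldl_map]]
  have := (main_inv m mask).1 0 [] 0
  simp only [Nat.cast_zero, zero_add] at this
  simp [PySem.List.len_eq, this]

-- ===== VERDICT (by name: the statement is the Claim_ definition above) =====
theorem find_contiguous_regions_spec : Claim_equal_find_contiguous_regions := by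
  intro mask min_samples _
  unfold Spec_find_contiguous_regions
  exact ports_agree mask min_samples
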